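-- pv_equiv track=rewrite | github.com/ssaadh/Data-Structures-Algorithms-SWE-LeetCode-Studying | W01/Coderbyte_1_python-fundamentals/stencil.py | count_score_frequencies
-- ===== SOURCE A (Python) =====
-- def count_score_frequencies(input_dict: dict[str, int]) -> dict[int, int]:
--   new_dict = {}
--   for _, score in input_dict.items():
--     if score in new_dict:
--       new_dict[score] += 1
--     else:
--       new_dict[score] = 1
--   return new_dict
-- ===== SOURCE B (Python) =====
-- def count_score_frequencies(input_dict: dict[str, int]) -> dict[int, int]:
--   vals = list(input_dict.values())
--   return {s: vals.count(s) for s in dict.fromkeys(vals)}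
-- ===== Notes on version B (the rewrite author's own statement) =====
-- stated objective: idiomatic
-- what changed: Replaces A's single accumulating pass over a growing dict with a two-phase comprehension: ordered dedup of the values then one count() scan per distinct score.
import Mathlib
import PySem

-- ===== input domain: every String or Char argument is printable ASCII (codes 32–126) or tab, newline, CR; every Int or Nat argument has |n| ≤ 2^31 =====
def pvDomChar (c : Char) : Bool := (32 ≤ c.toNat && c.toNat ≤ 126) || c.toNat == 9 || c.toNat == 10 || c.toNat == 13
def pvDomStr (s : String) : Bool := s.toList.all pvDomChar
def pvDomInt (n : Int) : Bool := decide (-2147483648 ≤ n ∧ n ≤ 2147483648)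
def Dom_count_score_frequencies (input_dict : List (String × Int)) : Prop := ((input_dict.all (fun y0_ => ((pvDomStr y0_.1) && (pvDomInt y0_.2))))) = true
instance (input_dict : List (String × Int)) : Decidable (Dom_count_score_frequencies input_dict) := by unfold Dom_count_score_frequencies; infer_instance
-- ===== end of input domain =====

-- B rewrites A's single accumulating pass as an ordered dedup of the values followed by one count per distinct score (idiomatic comprehension; not faster).

-- ===== PORT A =====
def count_score_frequencies (input_dict : List (String × Int)) : List (Int × Int) :=
  (input_dict.foldl
    (fun (d : PySem.Dict Int Int) (p : String × Int) =>
      if d.contains p.2 then d.insert p.2 (d.getD p.2 0 + 1) else d.insert p.2 1)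
    PySem.Dict.empty).items

-- ===== PORT B =====
def count_score_frequencies_alt (input_dict : List (String × Int)) : List (Int × Int) :=
  let vals := input_dict.map (·.2)
  (PySem.List.dedup vals).map (fun s => (s, (vals.count s : Int)))

-- ===== PRECONDITION & SPEC =====
def Spec_count_score_frequencies (input_dict : List (String × Int)) (out : List (Int × Int)) : Prop := out = count_score_frequencies_alt input_dict
instance (input_dict : List (String × Int)) (out : List (Int × Int)) : Decidable (Spec_count_score_frequencies input_dict out) := by unfold Spec_count_score_frequencies; infer_instance

-- ===== CLAIM (what is proved, stated in full; the proofs are below) =====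
def Claim_equal_count_score_frequencies : Prop := ∀ (input_dict : List (String × Int)), Dom_count_score_frequencies input_dict → Spec_count_score_frequencies input_dict (count_score_frequencies input_dict)

-- ===== LEMMAS AND PROOFS =====

-- A's branch on membership is the unconditional counting insert.
theorem pv_step_eq (d : PySem.Dict Int Int) (x : Int) :
    (if d.contains x then d.insert x (d.getD x 0 + 1) else d.insert x 1)
      = d.insert x (d.getD x 0 + 1) := by
  by_cases h : d.contains x = true
  · simp [h]
  · have h' : d.contains x = false := by simpa using h
    simp [h', PySem.Dict.getD_of_not_contains d 0 h']

-- ===== VERDICT (by name: the statement is the Claim_ definition above) =====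
theorem count_score_frequencies_spec : Claim_equal_count_score_frequencies := by
  intro input_dict _
  show count_score_frequencies input_dict = count_score_frequencies_alt input_dict
  unfold count_score_frequencies count_score_frequencies_alt
  have hf : (fun (d : PySem.Dict Int Int) (p : String × Int) =>
      if d.contains p.2 then d.insert p.2 (d.getD p.2 0 + 1) else d.insert p.2 1)
      = fun d p => d.insert p.2 (d.getD p.2 0 + 1) := by
    funext d p; exact pv_step_eq d p.2
  rw [hf, show (input_dict.foldl (fun (d : PySem.Dict Int Int) p => d.insert p.2 (d.getD p.2 0 + 1)) PySem.Dict.empty)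
      = ((input_dict.map (·.2)).foldl (fun d x => d.insert x (d.getD x 0 + 1)) PySem.Dict.empty) from (List.foldl_map (f := fun p : String × Int => p.2) (g := fun (d : PySem.Dict Int Int) x => d.insert x (d.getD x 0 + 1)) (l := input_dict) (init := PySem.Dict.empty)).symm,
    PySem.Dict.foldl_insert_getD_add_one_eq_counter, PySem.Dict.items_counter]
  simp [PySem.List.dedup_eq_ofList]
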